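-- pv_equiv track=rewrite | github.com/benquick123/code-profiling | code/batch-2/vse-naloge-brez-testov/DN7-Z-204.py | dolzina_poti
-- ===== SOURCE A (Python) =====
-- def dolzina_poti(pot):
--     koraki = 0
--     xx = []
--     yy = []
--     if pot:
--         for x,y in pot:
--             xx.append(x)
--             yy.append(y)
--         xzdej = xx[0]
--         yzdej = yy[0]
--         for x1 in xx:
--             if x1 != xzdej:
--                 koraki += abs(xzdej - x1)
--                 xzdej = x1
--         for y1 in yy:
--             if y1 != yzdej:
--                 koraki += abs(yzdej - y1)
--                 yzdej = y1
--     return koraki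
-- ===== SOURCE B (Python) =====
-- def dolzina_poti(pot):
--     skupaj = 0
--     prev = None
--     for x, y in pot:
--         if prev is not None:
--             skupaj += abs(prev[0] - x) + abs(prev[1] - y)
--         prev = (x, y)
--     return skupaj
-- ===== Notes on version B (the rewrite author's own statement) =====
-- stated objective: simpler
-- what changed: Single pass over consecutive point pairs keeping only the previous point, instead of building two coordinate lists and summing per-coordinate differences in two separate passes.
import Mathlib
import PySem

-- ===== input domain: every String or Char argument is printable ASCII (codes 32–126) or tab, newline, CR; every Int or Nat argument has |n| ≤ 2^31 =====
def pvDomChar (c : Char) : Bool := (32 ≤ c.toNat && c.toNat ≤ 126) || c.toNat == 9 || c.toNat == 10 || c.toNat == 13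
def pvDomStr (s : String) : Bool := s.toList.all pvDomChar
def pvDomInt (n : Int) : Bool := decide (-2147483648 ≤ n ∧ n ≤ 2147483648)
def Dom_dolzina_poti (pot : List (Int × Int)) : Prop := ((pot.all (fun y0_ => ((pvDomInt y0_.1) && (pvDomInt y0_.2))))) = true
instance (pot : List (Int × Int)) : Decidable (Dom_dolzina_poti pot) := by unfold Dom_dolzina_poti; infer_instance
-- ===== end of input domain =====

-- B replaces A's two per-coordinate passes over extracted coordinate lists by one
-- pass over consecutive point pairs (objective: simpler); same return value, no side effects.

-- ===== PORT A =====
-- one step of A's per-coordinate loop: 'if v != zdej: koraki += abs(zdej - v); zdej = v'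
def pvAStep (s : Int × Int) (v : Int) : Int × Int :=
  if v ≠ s.2 then (s.1 + |s.2 - v|, v) else s

def dolzina_poti (pot : List (Int × Int)) : Int :=
  let koraki : Int := 0
  -- 'for x,y in pot: xx.append(x); yy.append(y)'
  let xxyy := pot.foldl (fun (a : List Int × List Int) p => (a.1 ++ [p.1], a.2 ++ [p.2])) ([], [])
  match pot with
  | [] => koraki
  | (x0, y0) :: _ =>
    -- xzdej = xx[0]; yzdej = yy[0] (pot nonempty here)
    let r1 := xxyy.1.foldl pvAStep (koraki, x0)
    let r2 := xxyy.2.foldl pvAStep (r1.1, y0)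
    r2.1

-- ===== PORT B =====
def dolzina_poti_alt (pot : List (Int × Int)) : Int :=
  (pot.foldl (fun (s : Int × Option (Int × Int)) p =>
      match s.2 with
      | none => (s.1, some p)
      | some q => (s.1 + |q.1 - p.1| + |q.2 - p.2|, some p)) (0, none)).1

-- ===== PRECONDITION & SPEC =====
def Spec_dolzina_poti (pot : List (Int × Int)) (out : Int) : Prop := out = dolzina_poti_alt pot
instance (pot : List (Int × Int)) (out : Int) : Decidable (Spec_dolzina_poti pot out) := by unfold Spec_dolzina_poti; infer_instance

-- ===== CLAIM (what is proved, stated in full; the proofs are below) =====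
def Claim_equal_dolzina_poti : Prop := ∀ (pot : List (Int × Int)), Dom_dolzina_poti pot → Spec_dolzina_poti pot (dolzina_poti pot)

-- ===== LEMMAS AND PROOFS =====

-- sum of absolute differences along one coordinate sequence, starting from c
def pvS (c : Int) : List Int → Int
  | [] => 0
  | v :: t => |c - v| + pvS v t

def pvLast (c : Int) : List Int → Int
  | [] => c
  | v :: t => pvLast v t

-- sum of Manhattan steps along consecutive points, starting from q
def pvT (q : Int × Int) : List (Int × Int) → Int
  | [] => 0
  | p :: t => |q.1 - p.1| + |q.2 - p.2| + pvT p t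

theorem pvAStep_fold (l : List Int) (k c : Int) :
    l.foldl pvAStep (k, c) = (k + pvS c l, pvLast c l) := by
  induction l generalizing k c with
  | nil => simp [pvS, pvLast]
  | cons v t ih =>
    by_cases h : v = c
    · subst h
      simp [List.foldl, pvAStep, pvS, pvLast, ih]
    · simp only [List.foldl, pvAStep, pvS, pvLast, if_pos (by simpa using h)]
      rw [ih]
      ring_nf

theorem pvB_fold (l : List (Int × Int)) (k : Int) (q : Int × Int) :
    (l.foldl (fun (s : Int × Option (Int × Int)) p =>
      match s.2 with
      | none => (s.1, some p)
      | some q => (s.1 + |q.1 - p.1| + |q.2 - p.2|, some p)) (k, some q)).1 = k + pvT q l := by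
  induction l generalizing k q with
  | nil => simp [pvT]
  | cons p t ih =>
    simp only [List.foldl, pvT, ih]
    ring

theorem pvXXYY (pot : List (Int × Int)) (a b : List Int) :
    pot.foldl (fun (a : List Int × List Int) p => (a.1 ++ [p.1], a.2 ++ [p.2])) (a, b)
      = (a ++ pot.map Prod.fst, b ++ pot.map Prod.snd) := by
  induction pot generalizing a b with
  | nil => simp
  | cons p t ih => simp [List.foldl, ih]

theorem pvST (q : Int × Int) (t : List (Int × Int)) :
    pvS q.1 (t.map Prod.fst) + pvS q.2 (t.map Prod.snd) = pvT q t := by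
  induction t generalizing q with
  | nil => simp [pvS, pvT]
  | cons p t ih =>
    simp only [List.map, pvS, pvT]
    rw [← ih p]
    ring

-- ===== VERDICT (by name: the statement is the Claim_ definition above) =====
theorem dolzina_poti_spec : Claim_equal_dolzina_poti := by
  intro pot _
  unfold Spec_dolzina_poti dolzina_poti dolzina_poti_alt
  cases pot with
  | nil => simp
  | cons p t =>
    obtain ⟨x0, y0⟩ := p
    simp only [List.foldl]
    rw [pvB_fold]
    rw [pvXXYY]
    simp only [List.nil_append, List.singleton_append]
    rw [pvAStep_fold, pvAStep_fold]
    simp only [pvS, sub_self, abs_zero, zero_add]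
    rw [← pvST (x0, y0) t]
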